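-- pv_equiv track=rewrite | github.com/massimovaresio/EserciziProgrammazione_python | cartalk1_9-7.py | is_triple_double
-- ===== SOURCE A (Python) =====
-- def is_triple_double(word):
--     """Tests if a word contains three consecutive double letters.
--
--     word: string
--
--     returns: bool
--     """
--     i = 0
--     count = 0
--     while i < len(word)-1:
--         if word[i] == word[i+1]:
--             count = count + 1
--             if count == 3:
--                 return True
--             i = i + 2  # Avanza di due posizioni, saltando la doppia già contata. Questo codice viene eseguito solo se il controllo precedente (if count == 3:) non ha restituito True
--         else:
--             i = i + 1 - 2*count
--             count = 0
--             """
--             Se non trova una coppia, l'algoritmo deve "riposizionarsi" per ricominciare la ricerca di coppie consecutive da una posizione precedente,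
--             considerando quante coppie ha già trovato. Questo riposizionamento è fatto con la linea i = i + 1 - 2*count.
--             La funzione continua così, ricominciando la ricerca ogni volta che non trova una coppia di lettere doppie consecutive,
--             fino a trovare tre coppie consecutive o fino alla fine della parola.
--             La linea i = i + 1 - 2*count è progettata per riposizionare l'indice i in modo che possa ricominciare la ricerca delle coppie consecutive
--             di lettere doppie senza perdere possibili combinazioni. Questo meccanismo permette di gestire interruzioni tra coppie consecutive
--             e assicura che la funzione controlli accuratamente ogni possibile tripla coppia di lettere doppie.
--             """
--     return False # Se il ciclo termina senza trovare tre coppie consecutive di lettere doppie, restituisce False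
-- ===== SOURCE B (Python) =====
-- def is_triple_double(word):
--     """Tests if a word contains three consecutive double letters.
--
--     word: string
--
--     returns: bool
--     """
--     # Window scan: a triple double starts at some j with pairs at j, j+2, j+4.
--     return any(word[j] == word[j + 1]
--                and word[j + 2] == word[j + 3]
--                and word[j + 4] == word[j + 5]
--                for j in range(len(word) - 5))
-- ===== Notes on version B (the rewrite author's own statement) =====
-- stated objective: simpler
-- what changed: Replaced A's stateful while-loop with count tracking and i=i+1-2*count backtracking by a direct window scan: any j in range(len(word)-5) with pairs at j, j+2, j+4.
import Mathlib
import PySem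

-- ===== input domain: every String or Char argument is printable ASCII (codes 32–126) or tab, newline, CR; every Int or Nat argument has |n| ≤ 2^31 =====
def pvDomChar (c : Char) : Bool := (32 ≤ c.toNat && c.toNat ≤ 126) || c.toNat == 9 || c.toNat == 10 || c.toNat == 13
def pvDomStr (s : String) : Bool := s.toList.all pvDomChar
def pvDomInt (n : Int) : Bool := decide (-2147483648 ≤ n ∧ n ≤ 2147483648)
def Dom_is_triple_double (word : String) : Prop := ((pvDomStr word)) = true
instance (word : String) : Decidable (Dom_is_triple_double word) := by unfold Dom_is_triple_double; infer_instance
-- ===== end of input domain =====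

-- B replaces A's stateful while-loop (count state, i = i+1-2*count backtracking) by a
-- direct window scan over all start positions j; same O(n) cost, simpler.

-- ===== PORT A =====
-- A's while loop, step for step (guard i < len-1, the two branches in Python's order).
-- fuel is only a structural-termination guard: 3*len + 4 strictly exceeds the number of
-- loop iterations (the measure bound is proved in loopA_iff below), so the 0-fuel branch
-- is never reached from the initial state.  Python keeps 2*count ≤ i invariantly, so the
-- Nat subtraction in i + 1 - 2*count is exact; under the guard, indices i, i+1 are in
-- range, so List.getD is exact for word[i].
def pvLoopA (l : List Char) (fuel i count : Nat) : Bool :=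
  match fuel with
  | 0 => false
  | fuel + 1 =>
    if i + 1 < l.length then
      if l.getD i ' ' = l.getD (i + 1) ' ' then
        if count + 1 = 3 then true
        else pvLoopA l fuel (i + 2) (count + 1)
      else pvLoopA l fuel (i + 1 - 2 * count) 0
    else false

def is_triple_double (word : String) : Bool :=
  pvLoopA word.toList (3 * word.toList.length + 4) 0 0

-- ===== PORT B =====
-- Source B: any(word[j]==word[j+1] and word[j+2]==word[j+3] and word[j+4]==word[j+5]
--           for j in range(len(word)-5)); every index is in range, so getD is exact.
def is_triple_double_alt (word : String) : Bool :=
  let l := word.toList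
  (List.range (l.length - 5)).any fun j =>
    l.getD j ' ' == l.getD (j + 1) ' ' &&
    l.getD (j + 2) ' ' == l.getD (j + 3) ' ' &&
    l.getD (j + 4) ' ' == l.getD (j + 5) ' '

-- ===== PRECONDITION & SPEC =====
def Spec_is_triple_double (word : String) (out : Bool) : Prop := out = is_triple_double_alt word
instance (word : String) (out : Bool) : Decidable (Spec_is_triple_double word out) := by unfold Spec_is_triple_double; infer_instance

-- ===== CLAIM (what is proved, stated in full; the proofs are below) =====
def Claim_equal_is_triple_double : Prop := ∀ (word : String), Dom_is_triple_double word → Spec_is_triple_double word (is_triple_double word)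

-- ===== LEMMAS AND PROOFS =====

-- A triple double starting at position j.
def pvTrip (l : List Char) (j : Nat) : Prop :=
  l.getD j ' ' = l.getD (j + 1) ' ' ∧ l.getD (j + 2) ' ' = l.getD (j + 3) ' ' ∧
    l.getD (j + 4) ' ' = l.getD (j + 5) ' '

lemma altB_iff (word : String) :
    is_triple_double_alt word = true ↔
      ∃ j, j + 5 < word.toList.length ∧ pvTrip word.toList j := by
  simp only [is_triple_double_alt, List.any_eq_true, List.mem_range, pvTrip,
    Bool.and_eq_true, beq_iff_eq]
  constructor
  · rintro ⟨j, hj, ⟨h1, h2⟩, h3⟩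
    exact ⟨j, by omega, h1, h2, h3⟩
  · rintro ⟨j, hj, h1, h2, h3⟩
    exact ⟨j, by omega, ⟨h1, h2⟩, h3⟩

lemma loopA_iff (l : List Char) (fuel i count : Nat) (h1 : 2 * count ≤ i)
    (h2 : count ≤ 2) (hf : 3 * (l.length - (i - 2 * count)) + (3 - count) ≤ fuel)
    (pref : ∀ k, k < count →
      l.getD (i - 2 * count + 2 * k) ' ' = l.getD (i - 2 * count + 2 * k + 1) ' ') :
    pvLoopA l fuel i count = true ↔
      ∃ j, i - 2 * count ≤ j ∧ j + 5 < l.length ∧ pvTrip l j := by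
  induction fuel generalizing i count with
  | zero => omega
  | succ fuel ih =>
    rw [pvLoopA]
    by_cases hg : i + 1 < l.length
    · rw [if_pos hg]
      by_cases heq : l.getD i ' ' = l.getD (i + 1) ' '
      · rw [if_pos heq]
        by_cases hc : count + 1 = 3
        · rw [if_pos hc]
          -- count + 1 = 3: the three pairs sit at r, r+2, r+4 with r = i - 4
          have hc2 : count = 2 := by omega
          subst hc2
          have e0 := pref 0 (by omega)
          have e1 := pref 1 (by omega)
          simp only [true_iff]
          refine ⟨i - 4, by omega, by omega, ?_, ?_, ?_⟩
          · rw [show i - 4 = i - 2 * 2 + 2 * 0 from by omega]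
            exact e0
          · rw [show i - 4 + 2 = i - 2 * 2 + 2 * 1 from by omega,
                show i - 4 + 3 = i - 2 * 2 + 2 * 1 + 1 from by omega]
            exact e1
          · rw [show i - 4 + 4 = i from by omega, show i - 4 + 5 = i + 1 from by omega]
            exact heq
        · rw [if_neg hc]
          have hpref2 : ∀ k, k < count + 1 →
              l.getD (i + 2 - 2 * (count + 1) + 2 * k) ' ' =
                l.getD (i + 2 - 2 * (count + 1) + 2 * k + 1) ' ' := by
            intro k hk
            rw [show i + 2 - 2 * (count + 1) + 2 * k = i - 2 * count + 2 * k from by omega]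
            rcases Nat.lt_or_ge k count with hlt | hge
            · exact pref k hlt
            · rw [show i - 2 * count + 2 * k = i from by omega]
              exact heq
          rw [ih (i + 2) (count + 1) (by omega) (by omega) (by omega) hpref2]
          constructor <;> (rintro ⟨j, hj, hl, ht⟩; exact ⟨j, by omega, hl, ht⟩)
      · rw [if_neg heq]
        rw [ih (i + 1 - 2 * count) 0 (by omega) (by omega) (by omega) (by omega)]
        constructor
        · rintro ⟨j, hj, hlen, ht⟩
          exact ⟨j, by omega, hlen, ht⟩
        · rintro ⟨j, hj, hlen, ht⟩
          refine ⟨j, ?_, hlen, ht⟩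
          -- a triple cannot start at r = i - 2*count: its pair at i is refuted by heq
          rcases Nat.lt_or_ge (i - 2 * count) j with h | h
          · omega
          · exfalso
            have hj2 : j = i - 2 * count := by omega
            subst hj2
            obtain ⟨t0, t1, t2⟩ := ht
            interval_cases count
            · rw [show i - 2 * 0 = i from by omega] at t0
              exact heq t0
            · rw [show i - 2 * 1 + 2 = i from by omega,
                  show i - 2 * 1 + 3 = i + 1 from by omega] at t1
              exact heq t1
            · rw [show i - 2 * 2 + 4 = i from by omega,
                  show i - 2 * 2 + 5 = i + 1 from by omega] at t2
              exact heq t2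
    · rw [if_neg hg]
      simp only [Bool.false_eq_true, false_iff]
      rintro ⟨j, hj, hlen, -⟩
      omega

-- ===== VERDICT (by name: the statement is the Claim_ definition above) =====
theorem is_triple_double_spec : Claim_equal_is_triple_double := by
  intro word _
  unfold Spec_is_triple_double
  have hA := loopA_iff word.toList (3 * word.toList.length + 4) 0 0 (by omega) (by omega)
    (by omega) (by omega)
  have hB := altB_iff word
  rw [is_triple_double]
  by_cases h : pvLoopA word.toList (3 * word.toList.length + 4) 0 0 = true
  · rw [h]
    obtain ⟨j, _, hj, ht⟩ := hA.mp h
    exact (hB.mpr ⟨j, hj, ht⟩).symm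
  · rw [Bool.not_eq_true] at h
    rw [h]
    rcases hb : is_triple_double_alt word with _ | _
    · rfl
    · obtain ⟨j, hj, ht⟩ := hB.mp hb
      have hcontra := hA.mpr ⟨j, by omega, hj, ht⟩
      rw [h] at hcontra
      exact (Bool.false_ne_true hcontra).elim
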